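-- pv_equiv track=rewrite | github.com/debbie-drg/advent-of-code-2015 | Day11/day11.py | next_non_forbidden
-- ===== SOURCE A (Python) =====
-- FORBIDDEN_LETTERS = ["i", "l", "o"]
--
-- def next_non_forbidden(password: str) -> str:
--     forbidden_position = dict()
--     for element in FORBIDDEN_LETTERS:
--         try:
--             forbidden_position[element] = password.index(element)
--         except ValueError:
--             pass
--     letter_to_change = min(forbidden_position, key=forbidden_position.get)
--     index = forbidden_position[letter_to_change]
--     password = list(password)
--     password[index] = chr(ord(letter_to_change) + 1)
--     password[index + 1 :] = ["a" for _ in range(index + 1, len(password))]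
--     return "".join(password)
-- ===== SOURCE B (Python) =====
-- FORBIDDEN_LETTERS = ["i", "l", "o"]
--
-- def next_non_forbidden(password: str) -> str:
--     # single left-to-right scan: first position holding a forbidden letter
--     index = min(i for i, c in enumerate(password) if c in FORBIDDEN_LETTERS)
--     return password[:index] + chr(ord(password[index]) + 1) + "a" * (len(password) - index - 1)
-- ===== Notes on version B (the rewrite author's own statement) =====
-- stated objective: simpler
-- what changed: B replaces A's build-a-dict-of-first-occurrence-positions-for-each-forbidden-letter-then-argmin strategy with a single left-to-right scan that takes the first position holding a forbidden letter, and rebuilds the password by string slicing instead of list mutation.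
import Mathlib
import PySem

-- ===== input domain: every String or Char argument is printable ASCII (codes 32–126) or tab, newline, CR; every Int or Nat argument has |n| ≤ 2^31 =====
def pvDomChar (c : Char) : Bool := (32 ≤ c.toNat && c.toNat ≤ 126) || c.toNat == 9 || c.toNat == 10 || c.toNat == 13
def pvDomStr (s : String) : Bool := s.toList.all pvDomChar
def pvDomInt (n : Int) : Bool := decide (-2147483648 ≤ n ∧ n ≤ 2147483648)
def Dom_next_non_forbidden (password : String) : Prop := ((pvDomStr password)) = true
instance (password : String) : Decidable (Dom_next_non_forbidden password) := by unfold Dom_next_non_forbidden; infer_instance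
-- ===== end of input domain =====

-- B replaces A's dict-of-first-occurrence-positions-then-argmin by a single left-to-right
-- scan for the first forbidden position, and rebuilds the result by slicing instead of
-- list mutation (objective: simpler; same asymptotic cost).

-- ===== PORT A =====
def pvForbidden : List Char := ['i', 'l', 'o']   -- FORBIDDEN_LETTERS

def next_non_forbidden (password : String) : String :=
  -- forbidden_position = dict(); for element in FORBIDDEN_LETTERS:
  --   try: forbidden_position[element] = password.index(element) / except ValueError: pass
  -- (str.index raises ValueError exactly where find returns -1)
  let fp : PySem.Dict Char Int :=
    pvForbidden.foldl (fun d e =>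
      let r := PySem.Chars.find password.toList [e]
      if r = -1 then d else d.insert e r) PySem.Dict.empty
  -- letter_to_change = min(forbidden_position, key=forbidden_position.get)
  match PySem.List.min? fp.keys (fun k => fp.getD k 0) with
  | none => ""   -- min() over an empty dict raises ValueError; excluded by Pre_
  | some letter =>
      let index := fp.getD letter 0
      let cs := password.toList                                            -- password = list(password)
      let cs1 := PySem.List.pySetD cs index (Char.ofNat (letter.toNat + 1))  -- password[index] = chr(ord(letter)+1)
      -- password[index+1:] = ["a" for _ in range(index+1, len(password))]  (slice assignment by hand:
      -- kept prefix password[:index+1] followed by the replacement list)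
      let cs2 := PySem.List.slice cs1 none (some (index + 1)) ++
        (PySem.List.pyRange (index + 1) (PySem.List.len cs1) 1).map (fun _ => 'a')
      String.ofList cs2                                                    -- "".join(password)

-- ===== PORT B =====
def next_non_forbidden_alt (password : String) : String :=
  -- index = min(i for i, c in enumerate(password) if c in FORBIDDEN_LETTERS)
  let idxs := (PySem.List.enumerate password.toList 0).filterMap
      (fun p => if pvForbidden.contains p.2 then some p.1 else none)
  match PySem.List.min? idxs (fun i => i) with
  | none => ""   -- min() of an empty generator raises ValueError; excluded by Pre_
  | some index =>
      -- password[:index] + chr(ord(password[index]) + 1) + "a" * (len(password) - index - 1)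
      String.ofList (PySem.List.slice password.toList none (some index) ++
        [Char.ofNat ((PySem.List.pyGetD password.toList index ' ').toNat + 1)] ++
        PySem.List.pyRepeat ['a'] ((password.toList.length : Int) - index - 1))

-- ===== PRECONDITION & SPEC =====
-- Pre_ excludes exactly the passwords containing none of 'i','l','o': there A's min() over an
-- empty dict raises ValueError (and B's min() over an empty generator raises ValueError likewise).
def Pre_next_non_forbidden (password : String) : Prop :=
  'i' ∈ password.toList ∨ 'l' ∈ password.toList ∨ 'o' ∈ password.toList
instance (password : String) : Decidable (Pre_next_non_forbidden password) := by
  unfold Pre_next_non_forbidden; infer_instance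

def pvWitness_next_non_forbidden : String := "hello"

def Spec_next_non_forbidden (password : String) (out : String) : Prop :=
  out = next_non_forbidden_alt password
instance (password : String) (out : String) : Decidable (Spec_next_non_forbidden password out) := by
  unfold Spec_next_non_forbidden; infer_instance

-- ===== CLAIM (what is proved, stated in full; the proofs are below) =====
def Claim_equal_next_non_forbidden : Prop := ∀ (password : String), Dom_next_non_forbidden password → Pre_next_non_forbidden password → Spec_next_non_forbidden password (next_non_forbidden password)

-- ===== LEMMAS AND PROOFS =====

theorem single_prefix_iff {c : Char} {l : List Char} : [c] <+: l ↔ l.head? = some c := by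
  constructor
  · rintro ⟨t, rfl⟩; rfl
  · intro h; cases l with
    | nil => simp at h
    | cons x t => simp at h; subst h; exact ⟨t, rfl⟩

theorem single_infix_iff {c : Char} {l : List Char} : [c] <:+: l ↔ c ∈ l := by
  rw [List.infix_iff_prefix_suffix]
  constructor
  · rintro ⟨t, hp, ht⟩
    obtain ⟨t2, rfl⟩ := hp
    exact ht.subset (by simp)
  · intro h
    obtain ⟨l1, l2, rfl⟩ := List.append_of_mem h
    exact ⟨c :: l2, ⟨l2, rfl⟩, ⟨l1, rfl⟩⟩

theorem find_single_spec {cs : List Char} {c : Char} (h : c ∈ cs) :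
    0 ≤ PySem.Chars.find cs [c] ∧
    cs[(PySem.Chars.find cs [c]).toNat]? = some c ∧
    ∀ i < (PySem.Chars.find cs [c]).toNat, cs[i]? ≠ some c := by
  have hne : PySem.Chars.find cs [c] ≠ -1 := by
    rw [Ne, PySem.Chars.find_eq_neg_one_iff, not_not, single_infix_iff]; exact h
  have h0 : 0 ≤ PySem.Chars.find cs [c] := by
    have := PySem.Chars.neg_one_le_find cs [c]; omega
  obtain ⟨h1, h2⟩ := PySem.Chars.find_spec h0
  refine ⟨h0, ?_, ?_⟩
  · rw [← List.head?_drop]; exact single_prefix_iff.mp h1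
  · intro i hi hci
    exact h2 i hi (single_prefix_iff.mpr (by rw [List.head?_drop]; exact hci))

-- find of the letter sitting at the first forbidden position is that position
theorem find_at_findIdx (cs : List Char) (hj : cs.findIdx pvForbidden.contains < cs.length) :
    PySem.Chars.find cs [cs[cs.findIdx pvForbidden.contains]] = (cs.findIdx pvForbidden.contains : Int) := by
  set j := cs.findIdx pvForbidden.contains with hjdef
  have hmem : cs[j] ∈ cs := List.getElem_mem hj
  obtain ⟨h0, hget, hmin⟩ := find_single_spec hmem
  set f := PySem.Chars.find cs [cs[j]] with hfdef
  have hflen : f.toNat < cs.length := by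
    by_contra hc
    rw [List.getElem?_eq_none (by omega)] at hget
    simp at hget
  have h1 : ¬ f.toNat < j := by
    intro hlt
    have hpe : pvForbidden.contains cs[f.toNat] = false := List.not_of_lt_findIdx (hjdef ▸ hlt)
    rw [List.getElem?_eq_getElem hflen] at hget
    have heq : cs[f.toNat] = cs[j] := Option.some.inj hget
    rw [heq] at hpe
    have hpt : pvForbidden.contains cs[j] = true := List.findIdx_getElem (w := hj)
    rw [hpt] at hpe
    exact Bool.noConfusion hpe
  have h2 : ¬ j < f.toNat := by
    intro hlt
    exact hmin j hlt (List.getElem?_eq_getElem hj)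
  omega

-- any other present forbidden letter first occurs strictly later
theorem find_gt_findIdx (cs : List Char) (hj : cs.findIdx pvForbidden.contains < cs.length)
    (c : Char) (hc : pvForbidden.contains c = true) (hmem : c ∈ cs)
    (hne : c ≠ cs[cs.findIdx pvForbidden.contains]) :
    (cs.findIdx pvForbidden.contains : Int) < PySem.Chars.find cs [c] := by
  set j := cs.findIdx pvForbidden.contains with hjdef
  obtain ⟨h0, hget, hmin⟩ := find_single_spec hmem
  set f := PySem.Chars.find cs [c] with hfdef
  have hflen : f.toNat < cs.length := by
    by_contra hcc
    rw [List.getElem?_eq_none (by omega)] at hget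
    simp at hget
  rw [List.getElem?_eq_getElem hflen] at hget
  have hgete : cs[f.toNat] = c := Option.some.inj hget
  have h1 : f.toNat ≠ j := by
    intro heq
    apply hne
    rw [← hgete]
    simp_rw [heq, hjdef]
  have h2 : ¬ f.toNat < j := by
    intro hlt
    have hpe : pvForbidden.contains cs[f.toNat] = false := List.not_of_lt_findIdx (hjdef ▸ hlt)
    rw [hgete, hc] at hpe
    exact Bool.noConfusion hpe
  omega
-- every index produced by the B-side filter over `enumerate cs s` is ≥ s
theorem mem_idxs_ge {cs : List Char} {s x : Int}
    (hx : x ∈ (PySem.List.enumerate cs s).filterMap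
      (fun p => if pvForbidden.contains p.2 then some p.1 else none)) : s ≤ x := by
  simp only [List.mem_filterMap] at hx
  obtain ⟨p, hp, hcond⟩ := hx
  obtain ⟨k, hk, rfl⟩ := (PySem.List.mem_enumerate_iff _ _ _).mp hp
  split at hcond
  · simp at hcond; omega
  · simp at hcond

-- B's min over the generator is s + findIdx
theorem min_idxs_eq (cs : List Char) (s : Int)
    (h : cs.findIdx pvForbidden.contains < cs.length) :
    PySem.List.min? ((PySem.List.enumerate cs s).filterMap
      (fun p => if pvForbidden.contains p.2 then some p.1 else none)) (fun i => i)
    = some (s + (cs.findIdx pvForbidden.contains : Int)) := by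
  induction cs generalizing s with
  | nil => simp at h
  | cons c t ih =>
    rw [PySem.List.enumerate_cons]
    by_cases hc : pvForbidden.contains c
    · rw [List.filterMap_cons]
      simp only [hc, if_pos]
      rw [PySem.List.min?_id_cons]
      have hall : ∀ x ∈ (PySem.List.enumerate t (s+1)).filterMap
          (fun p => if pvForbidden.contains p.2 then some p.1 else none), s + 1 ≤ x :=
        fun x hx => mem_idxs_ge hx
      have hfold := PySem.List.foldl_min_le ((PySem.List.enumerate t (s+1)).filterMap
          (fun p => if pvForbidden.contains p.2 then some p.1 else none)) s
      have : List.foldl min s ((PySem.List.enumerate t (s+1)).filterMap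
          (fun p => if pvForbidden.contains p.2 then some p.1 else none)) = s := by
        rcases PySem.List.foldl_min_mem ((PySem.List.enumerate t (s+1)).filterMap
          (fun p => if pvForbidden.contains p.2 then some p.1 else none)) s with h1 | h1
        · exact h1
        · have := hall _ h1; omega
      rw [this, List.findIdx_cons, hc]
      simp
    · rw [List.filterMap_cons]
      simp only [hc, if_neg, Bool.false_eq_true, not_false_iff]
      rw [List.findIdx_cons] at h ⊢
      simp only [hc, cond_false] at h ⊢
      have := ih (s+1) (by simpa using h)
      rw [this]
      congr 1
      push_cast
      ring
-- A's mutate-then-slice output equals B's slice-and-append output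
theorem build_eq (cs : List Char) (j : Nat) (hj : j < cs.length) (v : Char) :
    PySem.List.slice (PySem.List.pySetD cs (j : Int) v) none (some ((j : Int) + 1)) ++
      (PySem.List.pyRange ((j : Int) + 1) (PySem.List.len (PySem.List.pySetD cs (j : Int) v)) 1).map
        (fun _ => 'a')
    = PySem.List.slice cs none (some (j : Int)) ++ [v] ++
        PySem.List.pyRepeat ['a'] ((cs.length : Int) - (j : Int) - 1) := by
  rw [PySem.List.pySetD_natCast]
  have hlen : PySem.List.len (cs.set j v) = (cs.length : Int) := by
    simp [PySem.List.len]
  rw [hlen]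
  have h1 : ((j : Int) + 1) = ((j + 1 : Nat) : Int) := by push_cast; ring
  rw [h1, PySem.List.slice_to_natCast, PySem.List.slice_to_natCast]
  -- prefix part
  have hset : cs.set j v = cs.take j ++ v :: cs.drop (j + 1) := by
    rw [List.set_eq_take_append_cons_drop]; simp [hj]
  have htake : (cs.set j v).take (j + 1) = cs.take j ++ [v] := by
    rw [hset, List.take_append]
    have : (cs.take j).length = j := by simp [Nat.le_of_lt hj]
    rw [this]
    simp
  rw [htake]
  -- suffix part
  have hrange : (PySem.List.pyRange ((j + 1 : Nat) : Int) (cs.length : Int) 1).map (fun _ => 'a')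
      = List.replicate (cs.length - j - 1) 'a' := by
    rw [PySem.List.pyRange_one]
    rw [List.map_map]
    have : ((cs.length : Int) - ((j + 1 : Nat) : Int)).toNat = cs.length - j - 1 := by omega
    rw [this]
    have hc : ((fun _ => 'a') ∘ fun k : Nat => ((j + 1 : Nat) : Int) + (k : Int)) = (fun _ : Nat => 'a') := rfl
    rw [hc, List.map_const', List.length_range]
  have hrep : PySem.List.pyRepeat ['a'] ((cs.length : Int) - (j : Int) - 1)
      = List.replicate (cs.length - j - 1) 'a' := by
    rw [PySem.List.pyRepeat_singleton]
    congr 1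
    omega
  rw [hrange, hrep]
theorem tail_eq' (password : String)
    (hj : password.toList.findIdx pvForbidden.contains < password.toList.length)
    (c : Char)
    (heq : password.toList[password.toList.findIdx pvForbidden.contains]'hj = c) :
    String.ofList (PySem.List.slice
        (PySem.List.pySetD password.toList ((password.toList.findIdx pvForbidden.contains : Int))
          (Char.ofNat (c.toNat + 1))) none
        (some ((password.toList.findIdx pvForbidden.contains : Int) + 1)) ++
      (PySem.List.pyRange ((password.toList.findIdx pvForbidden.contains : Int) + 1)
        (PySem.List.len (PySem.List.pySetD password.toList
          ((password.toList.findIdx pvForbidden.contains : Int))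
          (Char.ofNat (c.toNat + 1)))) 1).map (fun _ => 'a'))
    = next_non_forbidden_alt password := by
  unfold next_non_forbidden_alt
  dsimp only
  rw [min_idxs_eq password.toList 0 hj]
  simp only [zero_add]
  have hv : Char.ofNat ((PySem.List.pyGetD password.toList
      ((password.toList.findIdx pvForbidden.contains : Nat) : Int) ' ').toNat + 1)
      = Char.ofNat (c.toNat + 1) := by
    rw [PySem.List.pyGetD_eq_getElem password.toList ' ' (by positivity) (by exact_mod_cast hj)]
    simp [heq]
  rw [hv]
  exact congrArg String.ofList (build_eq password.toList _ hj (Char.ofNat (c.toNat + 1)))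


theorem A_eq_B (password : String)
    (hpre : 'i' ∈ password.toList ∨ 'l' ∈ password.toList ∨ 'o' ∈ password.toList) :
    next_non_forbidden password = next_non_forbidden_alt password := by
  have hex : ∃ x ∈ password.toList, pvForbidden.contains x = true := by
    rcases hpre with h | h | h
    · exact ⟨'i', h, by decide⟩
    · exact ⟨'l', h, by decide⟩
    · exact ⟨'o', h, by decide⟩
  have hj : password.toList.findIdx pvForbidden.contains < password.toList.length :=
    List.findIdx_lt_length.mpr hex
  have he0' : password.toList[password.toList.findIdx pvForbidden.contains]'hj = 'i' ∨
      password.toList[password.toList.findIdx pvForbidden.contains]'hj = 'l' ∨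
      password.toList[password.toList.findIdx pvForbidden.contains]'hj = 'o' := by
    have he0 : pvForbidden.contains
        (password.toList[password.toList.findIdx pvForbidden.contains]'hj) = true :=
      List.findIdx_getElem (w := hj)
    revert he0
    simp [pvForbidden]
  have hmem0 : password.toList[password.toList.findIdx pvForbidden.contains]'hj ∈ password.toList :=
    List.getElem_mem hj
  have hfact : ∀ c : Char, pvForbidden.contains c = true → c ∈ password.toList →
      (password.toList[password.toList.findIdx pvForbidden.contains]'hj = c ∧
        PySem.Chars.find password.toList [c] = (password.toList.findIdx pvForbidden.contains : Int)) ∨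
      (password.toList[password.toList.findIdx pvForbidden.contains]'hj ≠ c ∧
        (password.toList.findIdx pvForbidden.contains : Int) < PySem.Chars.find password.toList [c]) := by
    intro c hc hm
    by_cases heq : password.toList[password.toList.findIdx pvForbidden.contains]'hj = c
    · left
      refine ⟨heq, ?_⟩
      rw [← heq]
      exact find_at_findIdx password.toList hj
    · right
      exact ⟨heq, find_gt_findIdx password.toList hj c hc hm (fun h => heq h.symm)⟩
  have habs : ∀ c : Char, c ∉ password.toList → PySem.Chars.find password.toList [c] = -1 :=
    fun c hc => (PySem.Chars.find_eq_neg_one_iff _ _).mpr (fun h => hc (single_infix_iff.mp h))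
  unfold next_non_forbidden
  dsimp only
  simp only [pvForbidden, List.foldl_cons, List.foldl_nil]
  by_cases hi : 'i' ∈ password.toList
  · have hfi := (find_single_spec hi).1
    by_cases hl : 'l' ∈ password.toList
    · have hfl := (find_single_spec hl).1
      by_cases ho : 'o' ∈ password.toList
      · -- i, l, o all present
        have hfo := (find_single_spec ho).1
        rw [if_neg (by omega), if_neg (by omega), if_neg (by omega)]
        simp only [PySem.Dict.keys_insert_of_not_contains, PySem.Dict.contains_insert,
          PySem.Dict.contains_empty, PySem.Dict.keys_empty, Char.reduceBEq, Bool.or_false,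
          Bool.or_self, List.nil_append, List.cons_append, PySem.List.min?, List.foldl,
          PySem.Dict.getD_insert, PySem.Dict.getD_empty, Char.reduceEq, reduceIte]
        rcases hfact 'i' (by decide) hi with ⟨hqi, hvi⟩ | ⟨hqi, hvi⟩ <;>
          rcases hfact 'l' (by decide) hl with ⟨hql, hvl⟩ | ⟨hql, hvl⟩ <;>
          rcases hfact 'o' (by decide) ho with ⟨hqo, hvo⟩ | ⟨hqo, hvo⟩
        · exact absurd (hqi.symm.trans hql) (by decide)
        · exact absurd (hqi.symm.trans hql) (by decide)
        · exact absurd (hqi.symm.trans hqo) (by decide)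
        · rw [if_neg (by omega)]
          simp only [Char.reduceEq, reduceIte]
          rw [if_neg (by omega)]
          simp only [Char.reduceEq, reduceIte]
          rw [hvi]
          exact tail_eq' password hj 'i' hqi
        · exact absurd (hql.symm.trans hqo) (by decide)
        · rw [if_pos (by omega)]
          simp only [Char.reduceEq, reduceIte]
          rw [if_neg (by omega)]
          simp only [Char.reduceEq, reduceIte]
          rw [hvl]
          exact tail_eq' password hj 'l' hql
        · rcases lt_or_ge (PySem.Chars.find password.toList ['l'])
              (PySem.Chars.find password.toList ['i']) with hlo | hlo
          · rw [if_pos (by omega)]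
            simp only [Char.reduceEq, reduceIte]
            rw [if_pos (by omega)]
            simp only [Char.reduceEq, reduceIte]
            rw [hvo]
            exact tail_eq' password hj 'o' hqo
          · rw [if_neg (by omega)]
            simp only [Char.reduceEq, reduceIte]
            rw [if_pos (by omega)]
            simp only [Char.reduceEq, reduceIte]
            rw [hvo]
            exact tail_eq' password hj 'o' hqo
        · rcases he0' with h | h | h
          · exact absurd h hqi
          · exact absurd h hql
          · exact absurd h hqo
      · -- i, l present, o absent
        rw [if_pos (habs 'o' ho), if_neg (by omega), if_neg (by omega)]
        simp only [PySem.Dict.keys_insert_of_not_contains, PySem.Dict.contains_insert,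
          PySem.Dict.contains_empty, PySem.Dict.keys_empty, Char.reduceBEq, Bool.or_false,
          Bool.or_self, List.nil_append, List.cons_append, PySem.List.min?, List.foldl,
          PySem.Dict.getD_insert, PySem.Dict.getD_empty, Char.reduceEq, reduceIte]
        rcases hfact 'i' (by decide) hi with ⟨hqi, hvi⟩ | ⟨hqi, hvi⟩ <;>
          rcases hfact 'l' (by decide) hl with ⟨hql, hvl⟩ | ⟨hql, hvl⟩
        · exact absurd (hqi.symm.trans hql) (by decide)
        · rw [if_neg (by omega)]
          simp only [Char.reduceEq, reduceIte]
          rw [hvi]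
          exact tail_eq' password hj 'i' hqi
        · rw [if_pos (by omega)]
          simp only [Char.reduceEq, reduceIte]
          rw [hvl]
          exact tail_eq' password hj 'l' hql
        · rcases he0' with h | h | h
          · exact absurd h hqi
          · exact absurd h hql
          · exact absurd (h ▸ hmem0) ho
    · by_cases ho : 'o' ∈ password.toList
      · -- i, o present, l absent
        have hfo := (find_single_spec ho).1
        rw [if_neg (by omega), if_pos (habs 'l' hl), if_neg (by omega)]
        simp only [PySem.Dict.keys_insert_of_not_contains, PySem.Dict.contains_insert,
          PySem.Dict.contains_empty, PySem.Dict.keys_empty, Char.reduceBEq, Bool.or_false,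
          Bool.or_self, List.nil_append, List.cons_append, PySem.List.min?, List.foldl,
          PySem.Dict.getD_insert, PySem.Dict.getD_empty, Char.reduceEq, reduceIte]
        rcases hfact 'i' (by decide) hi with ⟨hqi, hvi⟩ | ⟨hqi, hvi⟩ <;>
          rcases hfact 'o' (by decide) ho with ⟨hqo, hvo⟩ | ⟨hqo, hvo⟩
        · exact absurd (hqi.symm.trans hqo) (by decide)
        · rw [if_neg (by omega)]
          simp only [Char.reduceEq, reduceIte]
          rw [hvi]
          exact tail_eq' password hj 'i' hqi
        · rw [if_pos (by omega)]
          simp only [Char.reduceEq, reduceIte]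
          rw [hvo]
          exact tail_eq' password hj 'o' hqo
        · rcases he0' with h | h | h
          · exact absurd h hqi
          · exact absurd (h ▸ hmem0) hl
          · exact absurd h hqo
      · -- only i present
        rw [if_pos (habs 'o' ho), if_pos (habs 'l' hl), if_neg (by omega)]
        simp only [PySem.Dict.keys_insert_of_not_contains, PySem.Dict.contains_insert,
          PySem.Dict.contains_empty, PySem.Dict.keys_empty, Char.reduceBEq, Bool.or_false,
          Bool.or_self, List.nil_append, List.cons_append, PySem.List.min?, List.foldl,
          PySem.Dict.getD_insert, PySem.Dict.getD_empty, Char.reduceEq, reduceIte]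
        rcases hfact 'i' (by decide) hi with ⟨hqi, hvi⟩ | ⟨hqi, hvi⟩
        · rw [hvi]
          exact tail_eq' password hj 'i' hqi
        · rcases he0' with h | h | h
          · exact absurd h hqi
          · exact absurd (h ▸ hmem0) hl
          · exact absurd (h ▸ hmem0) ho
  · by_cases hl : 'l' ∈ password.toList
    · have hfl := (find_single_spec hl).1
      by_cases ho : 'o' ∈ password.toList
      · -- l, o present, i absent
        have hfo := (find_single_spec ho).1
        rw [if_neg (by omega), if_neg (by omega), if_pos (habs 'i' hi)]
        simp only [PySem.Dict.keys_insert_of_not_contains, PySem.Dict.contains_insert,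
          PySem.Dict.contains_empty, PySem.Dict.keys_empty, Char.reduceBEq, Bool.or_false,
          Bool.or_self, List.nil_append, List.cons_append, PySem.List.min?, List.foldl,
          PySem.Dict.getD_insert, PySem.Dict.getD_empty, Char.reduceEq, reduceIte]
        rcases hfact 'l' (by decide) hl with ⟨hql, hvl⟩ | ⟨hql, hvl⟩ <;>
          rcases hfact 'o' (by decide) ho with ⟨hqo, hvo⟩ | ⟨hqo, hvo⟩
        · exact absurd (hql.symm.trans hqo) (by decide)
        · rw [if_neg (by omega)]
          simp only [Char.reduceEq, reduceIte]
          rw [hvl]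
          exact tail_eq' password hj 'l' hql
        · rw [if_pos (by omega)]
          simp only [Char.reduceEq, reduceIte]
          rw [hvo]
          exact tail_eq' password hj 'o' hqo
        · rcases he0' with h | h | h
          · exact absurd (h ▸ hmem0) hi
          · exact absurd h hql
          · exact absurd h hqo
      · -- only l present
        rw [if_pos (habs 'o' ho), if_neg (by omega), if_pos (habs 'i' hi)]
        simp only [PySem.Dict.keys_insert_of_not_contains, PySem.Dict.contains_insert,
          PySem.Dict.contains_empty, PySem.Dict.keys_empty, Char.reduceBEq, Bool.or_false,
          Bool.or_self, List.nil_append, List.cons_append, PySem.List.min?, List.foldl,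
          PySem.Dict.getD_insert, PySem.Dict.getD_empty, Char.reduceEq, reduceIte]
        rcases hfact 'l' (by decide) hl with ⟨hql, hvl⟩ | ⟨hql, hvl⟩
        · rw [hvl]
          exact tail_eq' password hj 'l' hql
        · rcases he0' with h | h | h
          · exact absurd (h ▸ hmem0) hi
          · exact absurd h hql
          · exact absurd (h ▸ hmem0) ho
    · by_cases ho : 'o' ∈ password.toList
      · -- only o present
        have hfo := (find_single_spec ho).1
        rw [if_neg (by omega), if_pos (habs 'l' hl), if_pos (habs 'i' hi)]
        simp only [PySem.Dict.keys_insert_of_not_contains, PySem.Dict.contains_insert,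
          PySem.Dict.contains_empty, PySem.Dict.keys_empty, Char.reduceBEq, Bool.or_false,
          Bool.or_self, List.nil_append, List.cons_append, PySem.List.min?, List.foldl,
          PySem.Dict.getD_insert, PySem.Dict.getD_empty, Char.reduceEq, reduceIte]
        rcases hfact 'o' (by decide) ho with ⟨hqo, hvo⟩ | ⟨hqo, hvo⟩
        · rw [hvo]
          exact tail_eq' password hj 'o' hqo
        · rcases he0' with h | h | h
          · exact absurd (h ▸ hmem0) hi
          · exact absurd (h ▸ hmem0) hl
          · exact absurd h hqo
      · -- none present: contradicts hpre
        exact absurd hpre (by simp [hi, hl, ho])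

-- ===== VERDICT (by name: the statement is the Claim_ definition above) =====
theorem next_non_forbidden_spec : Claim_equal_next_non_forbidden := by
  intro password _ hpre
  unfold Spec_next_non_forbidden
  exact A_eq_B password hpre
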